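-- pv_equiv track=rewrite | github.com/mkuchnik/relm | relm/src/relm/regex.py | simple_prefix_in_regex
-- ===== SOURCE A (Python) =====
-- def simple_prefix_in_regex(query):
--     """Return a string (not-regex) prefix in regex."""
--     special_chars = set([
--         "(",
--         ")",
--         "[",
--         "]",
--         "*",
--         "+",
--         ".",
--         "|",
--     ])
--     special_char_idxs = [i for i, char in enumerate(query) if char in
--                          special_chars]
--     # TODO(mkuchnik): Need to implement full stack-based parsing
--     if not special_char_idxs:
--         return query
--     first_special_idx = min(special_char_idxs)
--     return query[:first_special_idx]
-- ===== SOURCE B (Python) =====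
-- def simple_prefix_in_regex(query):
--     """Return a string (not-regex) prefix in regex."""
--     cut = min((j for j in map(query.find, "()[]*+.|") if j != -1),
--               default=len(query))
--     return query[:cut]
-- ===== Notes on version B (the rewrite author's own statement) =====
-- stated objective: faster
-- what changed: Instead of enumerating every character of the query in Python and taking the min of all special-character indices, B runs one str.find per special character (8 C-level substring searches) and cuts the query at the smallest hit, defaulting to the full length.
import Mathlib
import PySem

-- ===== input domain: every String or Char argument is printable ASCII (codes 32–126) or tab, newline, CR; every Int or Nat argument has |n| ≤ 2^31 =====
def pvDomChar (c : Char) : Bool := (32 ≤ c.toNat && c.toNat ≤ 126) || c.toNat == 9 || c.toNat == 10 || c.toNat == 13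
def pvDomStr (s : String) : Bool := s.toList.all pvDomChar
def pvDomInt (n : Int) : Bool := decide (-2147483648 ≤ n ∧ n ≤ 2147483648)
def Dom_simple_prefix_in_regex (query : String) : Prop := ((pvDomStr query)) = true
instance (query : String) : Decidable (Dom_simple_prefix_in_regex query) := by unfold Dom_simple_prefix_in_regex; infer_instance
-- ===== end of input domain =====

-- B replaces A's per-character index enumeration by one str.find per special character
-- plus a min with default; a timing run measured B faster (constant-factor: C-level find).


-- ===== PORT A =====
def simple_prefix_in_regex (query : String) : String :=
  let special_chars : PySem.Set Char :=
    PySem.Set.ofList ['(', ')', '[', ']', '*', '+', '.', '|']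
  let special_char_idxs : List Int :=
    ((PySem.List.enumerate query.toList).filter
      (fun p => PySem.Set.contains special_chars p.2)).map (fun p => p.1)
  if special_char_idxs.isEmpty then query
  else
    let first_special_idx : Int :=
      (PySem.List.min? special_char_idxs (fun x => x)).getD 0
    PySem.Str.slice query none (some first_special_idx)

-- ===== PORT B =====
def simple_prefix_in_regex_alt (query : String) : String :=
  let cut : Int :=
    PySem.List.minD
      ((("()[]*+.|" : String).toList.map
        (fun c => PySem.Str.find query (String.ofList [c]))).filter (fun j => j ≠ -1))
      (fun x => x) (PySem.Str.len query)
  PySem.Str.slice query none (some cut)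

-- ===== PRECONDITION & SPEC =====
def Spec_simple_prefix_in_regex (query : String) (out : String) : Prop := out = simple_prefix_in_regex_alt query
instance (query : String) (out : String) : Decidable (Spec_simple_prefix_in_regex query out) := by unfold Spec_simple_prefix_in_regex; infer_instance

-- ===== CLAIM (what is proved, stated in full; the proofs are below) =====
def Claim_equal_simple_prefix_in_regex : Prop := ∀ (query : String), Dom_simple_prefix_in_regex query → Spec_simple_prefix_in_regex query (simple_prefix_in_regex query)

-- ===== LEMMAS AND PROOFS =====

/-- The eight regex special characters, shared vocabulary of the proofs. -/
def pvSpecial (c : Char) : Bool := c ∈ ['(', ')', '[', ']', '*', '+', '.', '|']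

/-- Singleton prefix = head?. -/
lemma pv_singleton_prefix (t : List Char) (c : Char) : [c] <+: t ↔ t.head? = some c := by
  cases t with
  | nil => simp
  | cons d t =>
    constructor
    · rintro ⟨u, hu⟩
      cases hu
      simp
    · intro h
      simp only [List.head?_cons, Option.some.injEq] at h
      subst h
      exact ⟨t, rfl⟩

/-- Singleton prefix of a drop = getElem?. -/
lemma pv_singleton_prefix_drop (l : List Char) (k : Nat) (c : Char) :
    [c] <+: l.drop k ↔ l[k]? = some c := by
  rw [pv_singleton_prefix, List.head?_drop]

/-- Singleton infix = membership. -/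
lemma pv_singleton_infix (l : List Char) (c : Char) :
    [c] <:+: l ↔ c ∈ l := by
  constructor
  · intro h
    exact List.singleton_sublist.mp h.sublist
  · intro h
    obtain ⟨s, t, hst⟩ := List.append_of_mem h
    exact ⟨s, t, by simp [hst]⟩

/-- A's membership test is pvSpecial. -/
lemma pv_contains_special (c : Char) :
    PySem.Set.contains (PySem.Set.ofList ['(', ')', '[', ']', '*', '+', '.', '|']) c = pvSpecial c := by
  simp [PySem.Set.contains, pvSpecial]

/-- Membership in A's index list. -/
lemma pv_mem_idxs (l : List Char) (m : Int) :
    m ∈ ((PySem.List.enumerate l).filter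
        (fun p => PySem.Set.contains (PySem.Set.ofList ['(', ')', '[', ']', '*', '+', '.', '|']) p.2)).map
        (fun p => p.1) ↔
      ∃ k : Nat, ∃ _ : k < l.length, m = (k : Int) ∧ pvSpecial l[k] := by
  simp only [List.mem_map, List.mem_filter]
  constructor
  · rintro ⟨p, ⟨hpe, hps⟩, hpm⟩
    obtain ⟨k, hk, rfl⟩ := (PySem.List.mem_enumerate_iff l 0 p).mp hpe
    rw [pv_contains_special] at hps
    exact ⟨k, hk, by simpa using hpm.symm, hps⟩
  · rintro ⟨k, hk, rfl, hsp⟩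
    refine ⟨((k : Int), l[k]), ⟨(PySem.List.mem_enumerate_iff l 0 _).mpr ⟨k, hk, by simp⟩, ?_⟩, rfl⟩
    rw [pv_contains_special]
    exact hsp

/-- Membership in B's filtered find list. -/
lemma pv_mem_finds (l : List Char) (j : Int) :
    j ∈ (("()[]*+.|" : String).toList.map
        (fun c => PySem.Chars.find l [c])).filter (fun j => j ≠ -1) ↔
      ∃ c, pvSpecial c ∧ PySem.Chars.find l [c] = j ∧ j ≠ -1 := by
  have hchars : ("()[]*+.|" : String).toList = ['(', ')', '[', ']', '*', '+', '.', '|'] := by decide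
  simp only [List.mem_filter, List.mem_map, hchars]
  constructor
  · rintro ⟨⟨c, hc, rfl⟩, hne⟩
    exact ⟨c, by simpa [pvSpecial] using hc, rfl, by simpa using hne⟩
  · rintro ⟨c, hc, rfl, hne⟩
    exact ⟨⟨c, by simpa [pvSpecial] using hc, rfl⟩, by simpa using hne⟩

/-- A's minimum index equals findIdx when a special character exists. -/
lemma pv_A_min (l : List Char)
    (hne : ¬ ((PySem.List.enumerate l).filter
        (fun p => PySem.Set.contains (PySem.Set.ofList ['(', ')', '[', ']', '*', '+', '.', '|']) p.2)).map
        (fun p => p.1) = []) :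
    (PySem.List.min? (((PySem.List.enumerate l).filter
        (fun p => PySem.Set.contains (PySem.Set.ofList ['(', ')', '[', ']', '*', '+', '.', '|']) p.2)).map
        (fun p => p.1)) (fun x => x)).getD 0 = (l.findIdx pvSpecial : Int) := by
  obtain ⟨m, hm⟩ : ∃ m, PySem.List.min? (((PySem.List.enumerate l).filter
      (fun p => PySem.Set.contains (PySem.Set.ofList ['(', ')', '[', ']', '*', '+', '.', '|']) p.2)).map
      (fun p => p.1)) (fun x => x) = some m := by
    cases h : PySem.List.min? (((PySem.List.enumerate l).filter
        (fun p => PySem.Set.contains (PySem.Set.ofList ['(', ')', '[', ']', '*', '+', '.', '|']) p.2)).map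
        (fun p => p.1)) (fun x => x) with
    | none => exact absurd ((PySem.List.min?_eq_none_iff _ _).mp h) hne
    | some m => exact ⟨m, rfl⟩
  obtain ⟨k, hk, rfl, hsp⟩ := (pv_mem_idxs l m).mp (PySem.List.min?_mem hm)
  have hNk : l.findIdx pvSpecial ≤ k := by
    by_contra h
    push Not at h
    exact Bool.noConfusion (hsp.symm.trans (List.not_of_lt_findIdx h))
  have hlt : l.findIdx pvSpecial < l.length :=
    List.findIdx_lt_length.mpr ⟨l[k], List.getElem_mem hk, hsp⟩
  have hspN : pvSpecial l[l.findIdx pvSpecial] := List.findIdx_getElem (w := hlt)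
  have hmemN : ((l.findIdx pvSpecial : Int)) ∈ ((PySem.List.enumerate l).filter
      (fun p => PySem.Set.contains (PySem.Set.ofList ['(', ')', '[', ']', '*', '+', '.', '|']) p.2)).map
      (fun p => p.1) := (pv_mem_idxs l _).mpr ⟨_, hlt, rfl, hspN⟩
  have hle := PySem.List.min?_isMin hm _ hmemN
  simp only [hm, Option.getD_some]
  simp only at hle
  omega

/-- B's cut equals findIdx (with the no-special default equal to the length). -/
lemma pv_B_min (l : List Char) :
    PySem.List.minD ((("()[]*+.|" : String).toList.map
        (fun c => PySem.Chars.find l [c])).filter (fun j => j ≠ -1))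
      (fun x => x) (l.length : Int) = (l.findIdx pvSpecial : Int) := by
  by_cases hspec : l.findIdx pvSpecial < l.length
  · have hspN : pvSpecial l[l.findIdx pvSpecial] := List.findIdx_getElem (w := hspec)
    have hinf : [l[l.findIdx pvSpecial]] <:+: l :=
      (pv_singleton_infix l _).mpr (List.getElem_mem hspec)
    have hfind0 : (0 : Int) ≤ PySem.Chars.find l [l[l.findIdx pvSpecial]] :=
      (PySem.Chars.find_nonneg_iff l _).mpr hinf
    obtain ⟨hpref, hmin⟩ := PySem.Chars.find_spec hfind0
    have hle1 : (PySem.Chars.find l [l[l.findIdx pvSpecial]]).toNat ≤ l.findIdx pvSpecial := by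
      by_contra h
      push Not at h
      exact hmin _ h ((pv_singleton_prefix_drop l _ _).mpr (List.getElem?_eq_getElem hspec))
    have hge1 : l.findIdx pvSpecial ≤ (PySem.Chars.find l [l[l.findIdx pvSpecial]]).toNat := by
      by_contra h
      push Not at h
      have hne := List.not_of_lt_findIdx h
      have hgd := (pv_singleton_prefix_drop l _ _).mp hpref
      obtain ⟨hb, heq⟩ := List.getElem_of_getElem? hgd
      have hsp' : pvSpecial (l[(PySem.Chars.find l [l[l.findIdx pvSpecial]]).toNat]'hb) = true := by
        rw [heq]
        exact hspN
      exact Bool.noConfusion (hsp'.symm.trans hne)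
    have hfeq : PySem.Chars.find l [l[l.findIdx pvSpecial]] = (l.findIdx pvSpecial : Int) := by
      omega
    have hmemN : ((l.findIdx pvSpecial : Int)) ∈ (("()[]*+.|" : String).toList.map
        (fun c => PySem.Chars.find l [c])).filter (fun j => j ≠ -1) :=
      (pv_mem_finds l _).mpr ⟨_, hspN, hfeq, by omega⟩
    have hub := PySem.List.minD_id_le _ (l.length : Int) _ hmemN
    have hmm := PySem.List.minD_mem (("()[]*+.|" : String).toList.map
        (fun c => PySem.Chars.find l [c]) |>.filter (fun j => j ≠ -1))
        (fun x => x) (l.length : Int) (List.ne_nil_of_mem hmemN)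
    obtain ⟨c, hc, hfc, hne'⟩ := (pv_mem_finds l _).mp hmm
    set M := PySem.List.minD ((("()[]*+.|" : String).toList.map
        (fun c => PySem.Chars.find l [c])).filter (fun j => j ≠ -1))
      (fun x => x) (l.length : Int) with hM
    have hM0 : (0 : Int) ≤ M := by
      have := PySem.Chars.neg_one_le_find l [c]
      omega
    rw [← hfc] at hM0
    obtain ⟨hpref2, _⟩ := PySem.Chars.find_spec hM0
    have hgd2 := (pv_singleton_prefix_drop l _ _).mp hpref2
    have hlen2 : (PySem.Chars.find l [c]).toNat < l.length := by
      have := List.getElem?_eq_some_iff.mp hgd2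
      exact this.1
    obtain ⟨hb2, heq2⟩ := List.getElem_of_getElem? hgd2
    have hsp2 : pvSpecial l[(PySem.Chars.find l [c]).toNat] := by
      rw [heq2]
      exact hc
    have hlb : l.findIdx pvSpecial ≤ (PySem.Chars.find l [c]).toNat := by
      by_contra h
      push Not at h
      exact Bool.noConfusion (hsp2.symm.trans (List.not_of_lt_findIdx h))
    rw [hfc] at hM0
    omega
  · have hNlen : l.findIdx pvSpecial = l.length := by
      have := List.findIdx_le_length (p := pvSpecial) (xs := l)
      omega
    have hall := List.findIdx_eq_length.mp hNlen
    have hnil : (("()[]*+.|" : String).toList.map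
        (fun c => PySem.Chars.find l [c])).filter (fun j => j ≠ -1) = [] := by
      rw [List.eq_nil_iff_forall_not_mem]
      intro j hj
      obtain ⟨c, hc, hfc, hne'⟩ := (pv_mem_finds l _).mp hj
      have hin : [c] <:+: l := by
        by_contra h
        exact hne' (hfc ▸ (PySem.Chars.find_eq_neg_one_iff l [c]).mpr h)
      exact Bool.noConfusion (hc.symm.trans (hall c ((pv_singleton_infix l c).mp hin)))
    rw [hnil, PySem.List.minD_nil, hNlen]

theorem pv_main (q : String) : simple_prefix_in_regex q = simple_prefix_in_regex_alt q := by
  unfold simple_prefix_in_regex simple_prefix_in_regex_alt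
  have hfind : ∀ c : Char, PySem.Str.find q (String.ofList [c]) = PySem.Chars.find q.toList [c] := by
    intro c
    simp [PySem.Str.find_eq]
  have hlen : PySem.Str.len q = (q.toList.length : Int) := PySem.Str.len_eq q
  simp only [hfind, hlen]
  rw [pv_B_min q.toList]
  by_cases hspec : q.toList.findIdx pvSpecial < q.toList.length
  · have hspN : pvSpecial q.toList[q.toList.findIdx pvSpecial] := List.findIdx_getElem (w := hspec)
    have hmemN : ((q.toList.findIdx pvSpecial : Int)) ∈ ((PySem.List.enumerate q.toList).filter
        (fun p => PySem.Set.contains (PySem.Set.ofList ['(', ')', '[', ']', '*', '+', '.', '|']) p.2)).map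
        (fun p => p.1) := (pv_mem_idxs q.toList _).mpr ⟨_, hspec, rfl, hspN⟩
    have hne := List.ne_nil_of_mem hmemN
    rw [if_neg (by simpa [List.isEmpty_iff] using hne)]
    rw [pv_A_min q.toList hne]
  · have hNlen : q.toList.findIdx pvSpecial = q.toList.length := by
      have := List.findIdx_le_length (p := pvSpecial) (xs := q.toList)
      omega
    have hall := List.findIdx_eq_length.mp hNlen
    have hnil : ((PySem.List.enumerate q.toList).filter
        (fun p => PySem.Set.contains (PySem.Set.ofList ['(', ')', '[', ']', '*', '+', '.', '|']) p.2)).map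
        (fun p => p.1) = [] := by
      rw [List.eq_nil_iff_forall_not_mem]
      intro m hm
      obtain ⟨k, hk, rfl, hsp⟩ := (pv_mem_idxs q.toList m).mp hm
      exact Bool.noConfusion (hsp.symm.trans (hall _ (List.getElem_mem hk)))
    rw [if_pos (by rw [hnil]; rfl)]
    rw [hNlen]
    have ht : q.toList.take q.length = q.toList := by
      rw [← String.length_toList]
      exact List.take_length
    simp [PySem.Str.slice, ht]

-- ===== VERDICT (by name: the statement is the Claim_ definition above) =====
theorem simple_prefix_in_regex_spec : Claim_equal_simple_prefix_in_regex := by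
  intro q _
  unfold Spec_simple_prefix_in_regex
  exact pv_main q
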